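-- pv_equiv track=rewrite | github.com/mdgufran0949-ux/discipline-bot | tools/fetch_kids_trends.py | _is_kids_safe
-- ===== SOURCE A (Python) =====
-- def _is_kids_safe(text: str) -> bool:
--     """Basic check that the topic looks kid-appropriate (not adult news)."""
--     adult_signals = [
--         "war", "kill", "death", "murder", "crime", "attack", "election",
--         "trump", "biden", "politics", "stock", "crypto", "bitcoin",
--         "dating", "divorce", "salary", "lawsuit", "shooting"
--     ]
--     text_lower = text.lower()
--     return not any(sig in text_lower for sig in adult_signals)
-- ===== SOURCE B (Python) =====
-- _SIGNALS = (
--     "war", "kill", "death", "murder", "crime", "attack", "election",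
--     "trump", "biden", "politics", "stock", "crypto", "bitcoin",
--     "dating", "divorce", "salary", "lawsuit", "shooting"
-- )
--
--
-- def _is_kids_safe(text: str) -> bool:
--     """Single left-to-right scan: at each position test whether any signal starts there."""
--     t = text.lower()
--     for i in range(len(t)):
--         for sig in _SIGNALS:
--             if t.startswith(sig, i):
--                 return False
--     return True
-- ===== Notes on version B (the rewrite author's own statement) =====
-- stated objective: alternative
-- what changed: B replaces the 18 independent substring-containment tests with one left-to-right scan over the lowercased text that, at each position, checks whether any signal starts there (position-major instead of signal-major traversal).
import Mathlib
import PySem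

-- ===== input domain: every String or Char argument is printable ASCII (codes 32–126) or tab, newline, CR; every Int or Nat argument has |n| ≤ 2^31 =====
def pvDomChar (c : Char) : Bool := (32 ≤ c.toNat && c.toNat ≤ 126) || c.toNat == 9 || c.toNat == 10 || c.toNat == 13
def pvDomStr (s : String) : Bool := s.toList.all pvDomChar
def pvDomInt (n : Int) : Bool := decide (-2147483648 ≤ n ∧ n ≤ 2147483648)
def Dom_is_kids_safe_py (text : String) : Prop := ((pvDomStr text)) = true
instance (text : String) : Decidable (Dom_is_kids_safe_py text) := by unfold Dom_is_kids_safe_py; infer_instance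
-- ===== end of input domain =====

-- B scans the lowercased text once, position by position, instead of running 18 separate substring searches; same result, no speed claim.

-- ===== PORT A =====
def is_kids_safe_py (text : String) : Bool :=
  let adult_signals : List String :=
    ["war", "kill", "death", "murder", "crime", "attack", "election",
     "trump", "biden", "politics", "stock", "crypto", "bitcoin",
     "dating", "divorce", "salary", "lawsuit", "shooting"]
  let text_lower := PySem.Str.lower text
  !(adult_signals.any fun sig => PySem.Str.isIn sig text_lower)

-- ===== PORT B =====
def pvSignals : List String :=
  ["war", "kill", "death", "murder", "crime", "attack", "election",
   "trump", "biden", "politics", "stock", "crypto", "bitcoin",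
   "dating", "divorce", "salary", "lawsuit", "shooting"]

def pvScan : List Char → Bool
  | [] => true
  | c :: rest =>
    if pvSignals.any (fun sig => PySem.Chars.startswith (c :: rest) sig.toList) then false
    else pvScan rest

def is_kids_safe_py_alt (text : String) : Bool :=
  pvScan (PySem.Chars.lower text.toList)

-- ===== PRECONDITION & SPEC =====
def Spec_is_kids_safe_py (text : String) (out : Bool) : Prop := out = is_kids_safe_py_alt text
instance (text : String) (out : Bool) : Decidable (Spec_is_kids_safe_py text out) := by unfold Spec_is_kids_safe_py; infer_instance

-- ===== CLAIM (what is proved, stated in full; the proofs are below) =====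
def Claim_equal_is_kids_safe_py : Prop := ∀ (text : String), Dom_is_kids_safe_py text → Spec_is_kids_safe_py text (is_kids_safe_py text)

-- ===== LEMMAS AND PROOFS =====

lemma pv_any_congr {α : Type} (l : List α) (f g : α → Bool) (h : ∀ x ∈ l, f x = g x) :
    l.any f = l.any g := by
  induction l with
  | nil => rfl
  | cons a t ih => simp [List.any_cons, h a (by simp), ih (fun x hx => h x (by simp [hx]))]

-- the position-major scan computes the negation of "some signal occurs somewhere"
lemma pvScan_eq (cs : List Char) :
    pvScan cs = !(pvSignals.any fun sig => PySem.Chars.isIn sig.toList cs) := by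
  induction cs with
  | nil => decide
  | cons c rest ih =>
    rw [pvScan]
    by_cases h : pvSignals.any (fun sig => PySem.Chars.startswith (c :: rest) sig.toList) = true
    · simp only [h, if_true]
      obtain ⟨sig, hmem, hsw⟩ := List.any_eq_true.mp h
      have hin : PySem.Chars.isIn sig.toList (c :: rest) = true :=
        (PySem.Chars.isIn_iff_infix _ _).mpr
          ((PySem.Chars.startswith_iff _ _).mp hsw).isInfix
      simp [List.any_eq_true]
      exact ⟨sig, hmem, hin⟩
    · rw [if_neg h, ih]
      congr 1
      refine (pv_any_congr _ _ _ fun sig hmem => ?_).symm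
      have hnsw : ¬ sig.toList <+: (c :: rest) := by
        intro hp
        exact h (List.any_eq_true.mpr ⟨sig, hmem, (PySem.Chars.startswith_iff _ _).mpr hp⟩)
      by_cases hr : PySem.Chars.isIn sig.toList rest = true
      · have : PySem.Chars.isIn sig.toList (c :: rest) = true :=
          (PySem.Chars.isIn_iff_infix _ _).mpr
            (List.infix_cons_iff.mpr (Or.inr ((PySem.Chars.isIn_iff_infix _ _).mp hr)))
        simp [this, hr]
      · have : PySem.Chars.isIn sig.toList (c :: rest) = false := by
          rw [PySem.Chars.isIn_eq_false_iff]
          intro hinf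
          rcases List.infix_cons_iff.mp hinf with hp | hi
          · exact hnsw hp
          · exact hr ((PySem.Chars.isIn_iff_infix _ _).mpr hi)
        simp [this, hr]

-- ===== VERDICT (by name: the statement is the Claim_ definition above) =====
theorem is_kids_safe_py_spec : Claim_equal_is_kids_safe_py := by
  intro text _
  show is_kids_safe_py text = is_kids_safe_py_alt text
  rw [is_kids_safe_py_alt, pvScan_eq]
  simp [is_kids_safe_py, pvSignals, PySem.Str.isIn]
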